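-- pv_equiv track=rewrite | github.com/helihua1/Determine-the-business-relevance-of-user-questions | term_extractor.py | analyze_term_distribution
-- ===== SOURCE A (Python) =====
-- from typing import Dict, List, Optional, Tuple
--
-- def analyze_term_distribution(matched_terms: Dict) -> Dict[str, int]:
--     """
--     分析术语类型分布
--     Args:
--         matched_terms: 匹配结果字典
--     Returns:
--         术语类型统计字典
--     """
--     distribution = {
--         'drug': 0,
--         'device': 0,
--         'disease': 0,
--         'hospital': 0
--     }
--
--     for term, info in matched_terms.items():
--         term_type = info.get('type', 'unknown')
--         if term_type in distribution:
--             distribution[term_type] += 1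
--
--     return distribution
-- ===== SOURCE B (Python) =====
-- def analyze_term_distribution(matched_terms):
--     def count_type(t):
--         return sum(1 for info in matched_terms.values()
--                    if info.get('type', 'unknown') == t)
--     return {t: count_type(t) for t in ('drug', 'device', 'disease', 'hospital')}
-- ===== Notes on version B (the rewrite author's own statement) =====
-- stated objective: alternative
-- what changed: B keeps no running distribution at all: for each of the four fixed keys it performs an independent counting scan over the values (sum of matches) and assembles the result by comprehension, whereas A threads one pre-seeded dict through a single pass with a membership-guarded in-place increment.
import Mathlib
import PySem

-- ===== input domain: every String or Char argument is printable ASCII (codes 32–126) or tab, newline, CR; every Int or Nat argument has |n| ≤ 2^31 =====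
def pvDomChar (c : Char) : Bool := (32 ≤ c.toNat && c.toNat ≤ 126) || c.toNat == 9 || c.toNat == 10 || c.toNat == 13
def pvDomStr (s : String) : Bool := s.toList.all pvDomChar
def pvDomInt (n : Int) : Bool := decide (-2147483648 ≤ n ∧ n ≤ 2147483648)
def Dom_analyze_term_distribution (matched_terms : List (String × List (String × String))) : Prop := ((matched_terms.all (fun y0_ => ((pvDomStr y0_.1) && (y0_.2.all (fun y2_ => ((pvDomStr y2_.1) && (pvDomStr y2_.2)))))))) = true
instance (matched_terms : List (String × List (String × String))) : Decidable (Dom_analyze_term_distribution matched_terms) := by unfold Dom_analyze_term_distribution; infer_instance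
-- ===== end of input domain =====

-- B drops A's running distribution dict entirely: one independent counting scan per fixed key, then assemble (alternative decomposition, same O(n) per key).

-- ===== PORT A =====
def analyze_term_distribution (matched_terms : List (String × List (String × String))) : List (String × Int) :=
  let distribution : PySem.Dict String Int :=
    ((((PySem.Dict.empty.insert "drug" 0).insert "device" 0).insert "disease" 0).insert "hospital" 0)
  let final := matched_terms.foldl (fun dist p =>
    let term_type := (PySem.Dict.mk p.2).getD "type" "unknown"
    if dist.contains term_type then dist.modify term_type 0 (fun v => v + 1) else dist) distribution
  final.items

-- ===== PORT B =====
-- count_type t = sum(1 for info in matched_terms.values() if info.get('type','unknown') == t)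
def pvCountType (matched_terms : List (String × List (String × String))) (t : String) : Int :=
  matched_terms.foldl (fun acc p =>
    if (PySem.Dict.mk p.2).getD "type" "unknown" == t then acc + 1 else acc) 0

def analyze_term_distribution_alt (matched_terms : List (String × List (String × String))) : List (String × Int) :=
  ["drug", "device", "disease", "hospital"].map (fun t => (t, pvCountType matched_terms t))

-- ===== PRECONDITION & SPEC =====
def Spec_analyze_term_distribution (matched_terms : List (String × List (String × String))) (out : List (String × Int)) : Prop := out = analyze_term_distribution_alt matched_terms
instance (matched_terms : List (String × List (String × String))) (out : List (String × Int)) : Decidable (Spec_analyze_term_distribution matched_terms out) := by unfold Spec_analyze_term_distribution; infer_instance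

-- ===== CLAIM (what is proved, stated in full; the proofs are below) =====
def Claim_equal_analyze_term_distribution : Prop := ∀ (matched_terms : List (String × List (String × String))), Dom_analyze_term_distribution matched_terms → Spec_analyze_term_distribution matched_terms (analyze_term_distribution matched_terms)

-- ===== LEMMAS AND PROOFS =====

-- A's loop step, abstracted over the type string it processes
def pvStepA (dist : PySem.Dict String Int) (t : String) : PySem.Dict String Int :=
  if dist.contains t then dist.modify t 0 (fun v => v + 1) else dist

theorem pvStepA_keys (dist : PySem.Dict String Int) (t : String) : (pvStepA dist t).keys = dist.keys := by
  unfold pvStepA; split_ifs with h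
  · rw [PySem.Dict.keys_modify, PySem.Dict.keys_insert_of_contains _ _ h]
  · rfl

theorem pvFoldA_keys (l : List String) (dist : PySem.Dict String Int) :
    (l.foldl pvStepA dist).keys = dist.keys := by
  induction l generalizing dist with
  | nil => rfl
  | cons t l ih => simp [List.foldl_cons, ih, pvStepA_keys]

theorem pvFoldA_getD (l : List String) (dist : PySem.Dict String Int) (k : String)
    (hk : dist.contains k = true) :
    (l.foldl pvStepA dist).getD k 0 = dist.getD k 0 + l.count k := by
  induction l generalizing dist with
  | nil => simp
  | cons t l ih =>
    have hk' : (pvStepA dist t).contains k = true := by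
      unfold pvStepA; split_ifs <;> simp [PySem.Dict.contains_modify, hk]
    rw [List.foldl_cons, ih _ hk', List.count_cons]
    by_cases h : t = k
    · subst h
      unfold pvStepA
      rw [if_pos hk, PySem.Dict.getD_modify_self]
      simp; ring
    · have : (pvStepA dist t).getD k 0 = dist.getD k 0 := by
        unfold pvStepA; split_ifs with h2
        · exact PySem.Dict.getD_modify_of_ne dist 0 _ (Ne.symm h)
        · rfl
      simp [this, h]

-- B's per-key scan counts occurrences of t among the extracted type strings
theorem pvCountType_eq_count (mt : List (String × List (String × String))) (t : String) :
    pvCountType mt t = ((mt.map (fun p => (PySem.Dict.mk p.2).getD "type" "unknown")).count t : Int) := by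
  unfold pvCountType
  induction mt with
  | nil => simp
  | cons p l ih =>
    have step : ∀ (c : Int) (l' : List (String × List (String × String))),
        l'.foldl (fun acc q =>
          if (PySem.Dict.mk q.2).getD "type" "unknown" == t then acc + 1 else acc) c
        = c + l'.foldl (fun acc q =>
          if (PySem.Dict.mk q.2).getD "type" "unknown" == t then acc + 1 else acc) 0 := by
      intro c l'
      induction l' generalizing c with
      | nil => simp
      | cons q l'' ih' =>
        simp only [List.foldl_cons]
        split_ifs with h
        · rw [ih' (c + 1), ih' ((0:Int) + 1)]; ring
        · exact ih' c
    simp only [List.foldl_cons, List.map_cons, List.count_cons]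
    rw [step, ih]
    by_cases h : (PySem.Dict.mk p.2).getD "type" "unknown" = t
    · simp [h]; ring
    · have h2 : ¬ ((PySem.Dict.mk p.2).getD "type" "unknown" == t) = true := by
        simpa using h
      simp [h2, fun h' : t = (PySem.Dict.mk p.2).getD "type" "unknown" => h h'.symm]

-- ===== VERDICT (by name: the statement is the Claim_ definition above) =====
theorem analyze_term_distribution_spec : Claim_equal_analyze_term_distribution := by
  intro mt _
  unfold Spec_analyze_term_distribution analyze_term_distribution analyze_term_distribution_alt
  set types := mt.map (fun p => (PySem.Dict.mk p.2).getD "type" "unknown") with htypes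
  set dist0 : PySem.Dict String Int :=
    ((((PySem.Dict.empty.insert "drug" 0).insert "device" 0).insert "disease" 0).insert "hospital" 0) with hd0
  have hfold : mt.foldl (fun dist p =>
      let term_type := (PySem.Dict.mk p.2).getD "type" "unknown"
      if dist.contains term_type then dist.modify term_type 0 (fun v => v + 1) else dist) dist0
      = types.foldl pvStepA dist0 := by
    rw [htypes, List.foldl_map]; rfl
  simp only [hfold]
  have hkeys : (types.foldl pvStepA dist0).keys = ["drug", "device", "disease", "hospital"] := by
    rw [pvFoldA_keys]; decide
  have hnodup : (types.foldl pvStepA dist0).keys.Nodup := by rw [hkeys]; decide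
  have hitems := PySem.Dict.items_eq_map_keys (types.foldl pvStepA dist0) hnodup 0
  rw [hitems, hkeys]
  apply List.map_congr_left
  intro k hk
  have hc : dist0.contains k = true := by
    fin_cases hk <;> decide
  have h0 : dist0.getD k 0 = 0 := by
    fin_cases hk <;> decide
  rw [pvFoldA_getD _ _ _ hc, h0, pvCountType_eq_count, ← htypes]
  simp
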